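-- pv_equiv track=rewrite | github.com/matthme/open-habitation | api_helpers.py | classify_heating_quality
-- ===== SOURCE A (Python) =====
-- def classify_heating_quality(heatings: list):
--     """Classifies heating type into "renewable" or "non-renewable"
--
--     Parameters
--     ----------
--     heatings : list
--         list containing dicts of heating installation info
--
--     Returns
--     -------
--     str
--         "renewable" or "non-renewable"
--     """
--     heating_types = []
--     for heating in heatings:
--         try:
--             heating_types.append(heating["heating_type"])
--         except KeyError:
--             pass
--
--     if len(heatings) > 1:
--         if "wood (a)" in heating_types:
--             heating_types = list(filter(("wood (a)").__ne__, heating_types)) # remove occurrences of "wood (a)"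
--
--     heating_qualities = []
--
--     for heating_type in heating_types:
--         heating_qualities.append(classify_heating_type(heating_type))
--
--     if "unknown" in heating_qualities:
--         return "unknown"
--     elif "renewable" in heating_qualities and "non-renewable" in heating_qualities:
--         return "unknown"
--     elif "renewable" in heating_qualities:
--         return "renewable"
--     elif "non-renewable" in heating_qualities:
--         return "non-renewable"
--     else:
--         return "unknown"
--
-- def classify_heating_type(heating_type: str):
--     """
--     Classifies the heating type in "renewable", "non-renewable" or unknown
--
--     Parameters
--     ----------
--     heating_type : str
--         heating type
--     Returns
--     -------
--     str
--         quality of heating type, one of ["renewable", "non-renewable", "unknown"]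
--     """
--
--     if heating_type in ["wood (a)", "wood (b)", "wood (c)", "district_heating", "geothermal", "heatpump (air)", "heatpump (water)", "heatpump (geothermal)", "solar"]:
--         return "renewable"
--     elif heating_type in ["gas", "oil", "biogas", "electricity (resistive)", "heavy oil", "coal"]:
--         return "non-renewable"
--     else:
--         return "unknown"
-- ===== SOURCE B (Python) =====
-- RENEWABLE_TYPES = {"wood (a)", "wood (b)", "wood (c)", "district_heating", "geothermal",
--                    "heatpump (air)", "heatpump (water)", "heatpump (geothermal)", "solar"}
-- NON_RENEWABLE_TYPES = {"gas", "oil", "biogas", "electricity (resistive)", "heavy oil", "coal"}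
--
--
-- def classify_heating_type(heating_type: str):
--     if heating_type in RENEWABLE_TYPES:
--         return "renewable"
--     if heating_type in NON_RENEWABLE_TYPES:
--         return "non-renewable"
--     return "unknown"
--
--
-- def classify_heating_quality(heatings: list):
--     """Single pass over `heatings` keeping three flags instead of two intermediate lists."""
--     n = len(heatings)
--     has_unknown = has_renewable = has_non_renewable = False
--     for heating in heatings:
--         try:
--             heating_type = heating["heating_type"]
--         except KeyError:
--             continue
--         if n > 1 and heating_type == "wood (a)":
--             continue
--         quality = classify_heating_type(heating_type)
--         if quality == "renewable":
--             has_renewable = True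
--         elif quality == "non-renewable":
--             has_non_renewable = True
--         else:
--             has_unknown = True
--     if has_unknown:
--         return "unknown"
--     if has_renewable and has_non_renewable:
--         return "unknown"
--     if has_renewable:
--         return "renewable"
--     if has_non_renewable:
--         return "non-renewable"
--     return "unknown"
-- ===== Notes on version B (the rewrite author's own statement) =====
-- stated objective: simpler
-- what changed: Replaces A's three sequential list-building passes (collect types, conditionally filter out 'wood (a)', map to qualities, then four membership scans) by one pass over heatings maintaining three boolean flags, with the same unknown-first decision order.
import Mathlib
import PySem

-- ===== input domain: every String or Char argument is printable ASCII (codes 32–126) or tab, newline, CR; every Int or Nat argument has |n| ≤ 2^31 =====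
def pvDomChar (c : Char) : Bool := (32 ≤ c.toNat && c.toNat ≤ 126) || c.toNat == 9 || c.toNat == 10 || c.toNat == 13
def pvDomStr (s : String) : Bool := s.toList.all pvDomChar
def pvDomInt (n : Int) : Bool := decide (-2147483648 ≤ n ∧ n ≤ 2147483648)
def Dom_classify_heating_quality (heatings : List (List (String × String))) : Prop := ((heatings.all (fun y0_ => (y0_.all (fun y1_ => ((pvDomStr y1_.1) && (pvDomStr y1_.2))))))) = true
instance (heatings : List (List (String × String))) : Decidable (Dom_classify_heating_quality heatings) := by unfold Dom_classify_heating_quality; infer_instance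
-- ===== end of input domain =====

-- B differs from A by a single flag-keeping pass instead of list building + filter + map + membership scans; return value only, no mutation.

-- ===== PORT A =====
def classify_heating_type (heating_type : String) : String :=
  if heating_type ∈ ["wood (a)", "wood (b)", "wood (c)", "district_heating", "geothermal",
      "heatpump (air)", "heatpump (water)", "heatpump (geothermal)", "solar"] then "renewable"
  else if heating_type ∈ ["gas", "oil", "biogas", "electricity (resistive)", "heavy oil", "coal"] then
    "non-renewable"
  else "unknown"

def classify_heating_quality (heatings : List (List (String × String))) : String :=
  -- first loop: try heating["heating_type"], pass on KeyError
  let heating_types : List String :=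
    heatings.foldl (fun acc heating =>
      match (PySem.Dict.mk heating).get? "heating_type" with
      | some t => acc ++ [t]
      | none => acc) []
  let heating_types :=
    if heatings.length > 1 then
      if "wood (a)" ∈ heating_types then
        heating_types.filter (fun t => t ≠ "wood (a)")
      else heating_types
    else heating_types
  -- second loop: map to qualities
  let heating_qualities := heating_types.map classify_heating_type
  if "unknown" ∈ heating_qualities then "unknown"
  else if "renewable" ∈ heating_qualities ∧ "non-renewable" ∈ heating_qualities then "unknown"
  else if "renewable" ∈ heating_qualities then "renewable"
  else if "non-renewable" ∈ heating_qualities then "non-renewable"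
  else "unknown"

-- ===== PORT B =====
def classify_heating_quality_alt (heatings : List (List (String × String))) : String :=
  let n := heatings.length
  let flags : Bool × Bool × Bool :=
    heatings.foldl (fun st heating =>
      match (PySem.Dict.mk heating).get? "heating_type" with
      | none => st
      | some heating_type =>
        if n > 1 ∧ heating_type = "wood (a)" then st
        else
          let quality := classify_heating_type heating_type
          if quality = "renewable" then (st.1, true, st.2.2)
          else if quality = "non-renewable" then (st.1, st.2.1, true)
          else (true, st.2.1, st.2.2)) (false, false, false)
  if flags.1 then "unknown"
  else if flags.2.1 && flags.2.2 then "unknown"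
  else if flags.2.1 then "renewable"
  else if flags.2.2 then "non-renewable"
  else "unknown"

-- ===== PRECONDITION & SPEC =====
def Spec_classify_heating_quality (heatings : List (List (String × String))) (out : String) : Prop := out = classify_heating_quality_alt heatings
instance (heatings : List (List (String × String))) (out : String) : Decidable (Spec_classify_heating_quality heatings out) := by unfold Spec_classify_heating_quality; infer_instance

-- ===== CLAIM (what is proved, stated in full; the proofs are below) =====
def Claim_equal_classify_heating_quality : Prop := ∀ (heatings : List (List (String × String))), Dom_classify_heating_quality heatings → Spec_classify_heating_quality heatings (classify_heating_quality heatings)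

-- ===== LEMMAS AND PROOFS =====

/-- The types collected by A's first loop, structurally. -/
def pvCollect : List (List (String × String)) → List String
  | [] => []
  | h :: hs =>
    match (PySem.Dict.mk h).get? "heating_type" with
    | some t => t :: pvCollect hs
    | none => pvCollect hs

theorem pvCollect_foldl (hs : List (List (String × String))) (acc : List String) :
    hs.foldl (fun acc heating =>
      match (PySem.Dict.mk heating).get? "heating_type" with
      | some t => acc ++ [t]
      | none => acc) acc = acc ++ pvCollect hs := by
  induction hs generalizing acc with
  | nil => simp [pvCollect]
  | cons h t ih =>
    simp only [List.foldl_cons, pvCollect]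
    cases (PySem.Dict.mk h).get? "heating_type" <;> simp [ih]

/-- Effective type list: what A classifies after the conditional wood (a) removal. -/
def pvEff (n : Nat) (hs : List (List (String × String))) : List String :=
  (pvCollect hs).filter (fun t => !(decide (n > 1) && decide (t = "wood (a)")))

theorem pvEff_eq_A (n : Nat) (ts : List String) :
    (if n > 1 then
      if "wood (a)" ∈ ts then ts.filter (fun t => t ≠ "wood (a)") else ts
     else ts) = ts.filter (fun t => !(decide (n > 1) && decide (t = "wood (a)"))) := by
  by_cases h1 : n > 1
  · simp only [h1, if_true, decide_true, Bool.true_and]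
    by_cases h2 : "wood (a)" ∈ ts
    · simp [h2]
    · simp only [h2, if_false]
      rw [eq_comm, List.filter_eq_self]
      intro t ht
      simp only [Bool.not_eq_eq_eq_not, Bool.not_true, decide_eq_false_iff_not]
      rintro rfl; exact h2 ht
  · simp only [h1, if_false, decide_false, Bool.false_and, Bool.not_false]
    simp

/-- B's fold computes the three membership flags over the effective list. -/
theorem pvFold_flags (n : Nat) (hs : List (List (String × String))) (st : Bool × Bool × Bool) :
    hs.foldl (fun st heating =>
      match (PySem.Dict.mk heating).get? "heating_type" with
      | none => st
      | some heating_type =>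
        if n > 1 ∧ heating_type = "wood (a)" then st
        else
          let quality := classify_heating_type heating_type
          if quality = "renewable" then (st.1, true, st.2.2)
          else if quality = "non-renewable" then (st.1, st.2.1, true)
          else (true, st.2.1, st.2.2)) st
    = (st.1 || ((pvEff n hs).map classify_heating_type).contains "unknown",
       st.2.1 || ((pvEff n hs).map classify_heating_type).contains "renewable",
       st.2.2 || ((pvEff n hs).map classify_heating_type).contains "non-renewable") := by
  induction hs generalizing st with
  | nil => simp [pvEff, pvCollect]
  | cons h t ih =>
    obtain ⟨u, r, nr⟩ := st
    rw [List.foldl_cons, ih]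
    cases hg : (PySem.Dict.mk h).get? "heating_type" with
    | none =>
      simp [pvEff, pvCollect, hg]
    | some ty =>
      dsimp only
      have hcol : pvCollect (h :: t) = ty :: pvCollect t := by simp [pvCollect, hg]
      by_cases hskip : n > 1 ∧ ty = "wood (a)"
      · have hdrop : (!(decide (n > 1) && decide (ty = "wood (a)"))) = false := by
          simp [hskip.1, hskip.2]
        have heff : pvEff n (h :: t) = pvEff n t := by
          unfold pvEff; rw [hcol, List.filter_cons, hdrop]; simp
        rw [if_pos hskip, heff]
      · have hkeep : (!(decide (n > 1) && decide (ty = "wood (a)"))) = true := by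
          rcases not_and_or.mp hskip with h' | h' <;> simp [h']
        have heff : pvEff n (h :: t) = ty :: pvEff n t := by
          unfold pvEff; rw [hcol, List.filter_cons, hkeep]; simp
        rw [if_neg hskip, heff]
        by_cases h1 : classify_heating_type ty = "renewable"
        · rw [if_pos h1]
          simp [h1]
        · rw [if_neg h1]
          by_cases h2 : classify_heating_type ty = "non-renewable"
          · rw [if_pos h2]
            simp [h2]
          · rw [if_neg h2]
            have h3 : classify_heating_type ty = "unknown" := by
              unfold classify_heating_type
              unfold classify_heating_type at h1 h2
              split_ifs with a b
              · simp [a] at h1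
              · simp [a, b] at h2
              · rfl
            simp [h3]

-- ===== VERDICT (by name: the statement is the Claim_ definition above) =====
theorem classify_heating_quality_spec : Claim_equal_classify_heating_quality := by
  intro heatings _
  show classify_heating_quality heatings = classify_heating_quality_alt heatings
  unfold classify_heating_quality classify_heating_quality_alt
  dsimp only
  rw [pvCollect_foldl, pvFold_flags]
  simp only [List.nil_append, pvEff_eq_A]
  simp only [pvEff, Bool.false_or]
  set Q := (List.map classify_heating_type
      ((pvCollect heatings).filter
        (fun t => !(decide (heatings.length > 1) && decide (t = "wood (a)"))))) with hQ
  by_cases hu : "unknown" ∈ Q <;> by_cases hr : "renewable" ∈ Q <;>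
    by_cases hn : "non-renewable" ∈ Q <;>
      simp [hu, hr, hn]
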